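-- pv_equiv track=rewrite | github.com/educep/SEE | from_scratch/k_near.py | majority_vote
-- ===== SOURCE A (Python) =====
-- from collections import Counter, defaultdict
--
-- def majority_vote(labels: list) -> str:
--     """Assumes that labels are ordered from nearest to farthest."""
--     vote_counts = Counter(labels)
--     winner, winner_count = vote_counts.most_common(1)[0]
--     num_winners = len([count
--                        for count in vote_counts.values()
--                        if count == winner_count])
--
--     if num_winners == 1:
--         return winner                     # unique winner, so return it
--     else:
--         return majority_vote(labels[:-1]) # try again without the farthest
-- ===== SOURCE B (Python) =====
-- def majority_vote(labels: list) -> str: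
--     """Assumes that labels are ordered from nearest to farthest."""
--     counts = {}
--     for l in labels:
--         counts[l] = counts.get(l, 0) + 1
--     mx = max(counts.values())
--     ties = sum(1 for c in counts.values() if c == mx)
--     k = len(labels)
--     while ties > 1:
--         k -= 1
--         l = labels[k]
--         if counts[l] == mx:
--             ties -= 1
--         counts[l] -= 1
--     for l in labels:
--         if counts[l] == mx:
--             return l
-- ===== Notes on version B (the rewrite author's own statement) =====
-- stated objective: alternative
-- what changed: Replaces A's recursion that rebuilds a Counter and rescans it for every dropped suffix element with a single counter built once, then one backward pass that decrements counts and maintains the number of labels tied at the (invariant) maximum count, finally one forward scan for the unique winner; avoids A's worst-case quadratic tie-breaking but is not measurably faster on typical inputs.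
import Mathlib
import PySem

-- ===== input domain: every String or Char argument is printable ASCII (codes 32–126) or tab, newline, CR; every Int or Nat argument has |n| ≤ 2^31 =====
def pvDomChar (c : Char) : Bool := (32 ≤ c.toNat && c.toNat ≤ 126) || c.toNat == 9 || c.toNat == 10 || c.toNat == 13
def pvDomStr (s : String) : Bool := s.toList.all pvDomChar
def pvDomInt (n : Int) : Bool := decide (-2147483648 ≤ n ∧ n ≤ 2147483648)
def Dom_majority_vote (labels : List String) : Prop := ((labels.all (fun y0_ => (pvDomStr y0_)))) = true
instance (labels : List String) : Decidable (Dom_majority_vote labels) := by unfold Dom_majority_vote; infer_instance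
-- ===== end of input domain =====

-- B replaces A's per-suffix Counter rebuild + rescan recursion by one counter built once, a single
-- backward decrementing pass maintaining the tie multiplicity at the (invariant) maximum count, and
-- one forward scan for the unique winner (a structurally different algorithm, similar cost).

-- ===== PORT A =====
-- fuel-based structural recursion: the fuel (initially len(labels)) only makes the recursion
-- structural; each recursive call is on labels[:-1], one element shorter, and the singleton list
-- returns without recursing, so the fuel is never exhausted on a nonempty list
def mvGo : Nat → List String → String
  | 0, _ => ""          -- empty input: Python raises IndexError, excluded by Pre_
  | fuel + 1, labels =>
    let vote_counts := PySem.Dict.counter labels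
    match PySem.List.max? vote_counts.items (fun p => p.2) with
    | none => ""        -- unreachable: counter of a nonempty list is nonempty
    | some wc =>
      let num_winners := (vote_counts.values.filter (fun count => count == wc.2)).length
      if num_winners == 1 then wc.1
      else mvGo fuel (PySem.List.slice labels none (some (-1)))

def majority_vote (labels : List String) : String := mvGo labels.length labels

-- ===== PORT B =====
-- the 'while ties > 1' loop of Source B; the fuel is the index k itself (k = 0 with ties > 1 is never
-- reached when the loop is started on the states majority_vote_alt builds)
def mvLoop (labels : List String) (mx : Int) : Nat → PySem.Dict String Int → Int → PySem.Dict String Int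
  | k, counts, ties =>
    if ties > 1 then
      match k with
      | 0 => counts
      | k' + 1 =>
        let l := PySem.List.pyGetD labels (k' : Int) ""
        let c := counts.getD l 0
        mvLoop labels mx k' (counts.insert l (c - 1)) (if c == mx then ties - 1 else ties)
    else counts

def majority_vote_alt (labels : List String) : String :=
  let counts := labels.foldl (fun d l => d.insert l (d.getD l 0 + 1)) PySem.Dict.empty
  match PySem.List.max? counts.values (fun c => c) with
  | none => ""   -- Python raises ValueError (max of empty) on []: excluded by Pre_
  | some mx =>
    let ties : Int := (counts.values.filter (fun c => c == mx)).length
    let final := mvLoop labels mx labels.length counts ties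
    ((labels.find? (fun l => final.getD l 0 == mx)).getD "")

-- ===== PRECONDITION & SPEC =====
-- Pre_ excludes exactly the empty list, on which Python A raises IndexError (and B ValueError).
def Pre_majority_vote (labels : List String) : Prop := labels ≠ []
instance (labels : List String) : Decidable (Pre_majority_vote labels) := by unfold Pre_majority_vote; infer_instance
def pvWitness_majority_vote : List String := (["a", "b", "a"])
def Spec_majority_vote (labels : List String) (out : String) : Prop := out = majority_vote_alt labels
instance (labels : List String) (out : String) : Decidable (Spec_majority_vote labels out) := by unfold Spec_majority_vote; infer_instance

-- ===== CLAIM (what is proved, stated in full; the proofs are below) =====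
def Claim_equal_majority_vote : Prop := ∀ (labels : List String), Dom_majority_vote labels → Pre_majority_vote labels → Spec_majority_vote labels (majority_vote labels)

-- ===== LEMMAS AND PROOFS =====

-- the maximum label multiplicity of xs, as an Int (0 for [])
def Mx (xs : List String) : Int :=
  ((PySem.List.dedup xs).map (fun l => (xs.count l : Int))).foldl max 0

-- how many labels of ks have multiplicity m in xs
def TiesN (ks : List String) (xs : List String) (m : Int) : Nat :=
  ks.countP (fun l => ((xs.count l : Int) == m))

-- reference recursion: drop the farthest element until the maximum is attained by a unique label
def refFn (xs : List String) : String :=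
  if h : xs = [] then ""
  else if TiesN (PySem.List.dedup xs) xs (Mx xs) = 1 then
    ((xs.find? (fun l => ((xs.count l : Int) == Mx xs))).getD "")
  else refFn xs.dropLast
  termination_by xs.length
  decreasing_by
    have : xs.length ≠ 0 := fun hh => h (List.eq_nil_of_length_eq_zero hh)
    simp [List.length_dropLast]; omega


lemma Mx_ge (xs : List String) (l : String) (hl : l ∈ xs) : (xs.count l : Int) ≤ Mx xs := by
  refine (PySem.List.le_foldl_max _ 0).2 _ ?_
  exact List.mem_map_of_mem ((PySem.List.mem_dedup xs l).mpr hl)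

lemma Mx_attained (xs : List String) (h : xs ≠ []) :
    ∃ l ∈ PySem.List.dedup xs, (xs.count l : Int) = Mx xs := by
  rcases PySem.List.foldl_max_mem ((PySem.List.dedup xs).map (fun l => (xs.count l : Int))) 0 with h0 | hm
  · exfalso
    obtain ⟨a, ha⟩ := List.exists_mem_of_ne_nil xs h
    have h1 : 0 < xs.count a := List.count_pos_iff.mpr ha
    have h2 := Mx_ge xs a ha
    unfold Mx at h2
    rw [h0] at h2
    omega
  · rcases List.mem_map.mp hm with ⟨l, hl, hEq⟩
    exact ⟨l, hl, hEq⟩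

lemma Mx_pos (xs : List String) (h : xs ≠ []) : 1 ≤ Mx xs := by
  obtain ⟨l, hl, hEq⟩ := Mx_attained xs h
  have : 0 < xs.count l := List.count_pos_iff.mpr ((PySem.List.mem_dedup xs l).mp hl)
  omega

lemma countP_eq_of_nodup (p : String → Bool) (ks ks' : List String) (h1 : ks.Nodup) (h2 : ks'.Nodup)
    (h : ∀ l, p l = true → (l ∈ ks ↔ l ∈ ks')) : ks.countP p = ks'.countP p := by
  rw [List.countP_eq_length_filter, List.countP_eq_length_filter]
  refine List.Perm.length_eq ((List.perm_ext_iff_of_nodup (h1.filter p) (h2.filter p)).mpr ?_)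
  intro a
  simp only [List.mem_filter]
  constructor
  · rintro ⟨ha, hp⟩; exact ⟨(h a hp).mp ha, hp⟩
  · rintro ⟨ha, hp⟩; exact ⟨(h a hp).mpr ha, hp⟩

lemma TiesN_bridge (labels p : List String) (m : Int) (hm : 1 ≤ m) (hsub : ∀ l ∈ p, l ∈ labels) :
    TiesN (PySem.List.dedup labels) p m = TiesN (PySem.List.dedup p) p m := by
  unfold TiesN
  refine countP_eq_of_nodup _ _ _ (PySem.List.nodup_dedup _) (PySem.List.nodup_dedup _) ?_
  intro l hp
  have hc : (p.count l : Int) = m := by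
    have := of_decide_eq_true (by simpa using hp)
    omega
  have hcnt : l ∈ p := List.count_pos_iff.mp (by omega)
  simp [hcnt, hsub l hcnt]

lemma two_mem_length (xs : List String) (a b : String) (hab : a ≠ b) (ha : a ∈ xs) (hb : b ∈ xs) :
    2 ≤ xs.length := by
  cases xs with
  | nil => simp at ha
  | cons x t =>
    cases t with
    | nil =>
      simp at ha hb
      exact absurd (ha.trans hb.symm) hab
    | cons y t' => simp only [List.length_cons]; omega

lemma two_of_ties (ks xs : List String) (m : Int) (hm : 1 ≤ m) (hnd : ks.Nodup)
    (h2 : 2 ≤ TiesN ks xs m) :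
    2 ≤ xs.length ∧ ∃ l1 l2, l1 ≠ l2 ∧ (xs.count l1 : Int) = m ∧ (xs.count l2 : Int) = m := by
  unfold TiesN at h2
  rw [List.countP_eq_length_filter] at h2
  have hndf : (ks.filter (fun l => ((xs.count l : Int) == m))).Nodup := hnd.filter _
  rcases hfe : ks.filter (fun l => ((xs.count l : Int) == m)) with _ | ⟨a, _ | ⟨b, t⟩⟩ <;>
    rw [hfe] at h2 <;> try (simp at h2)
  rw [hfe] at hndf
  have hab : a ≠ b := by
    have := (List.nodup_cons.mp hndf).1
    simp at this
    exact fun e => this.1 e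
  have ha : a ∈ ks.filter (fun l => ((xs.count l : Int) == m)) := by rw [hfe]; simp
  have hb : b ∈ ks.filter (fun l => ((xs.count l : Int) == m)) := by rw [hfe]; simp
  have hca : (xs.count a : Int) = m := by
    have := (List.mem_filter.mp ha).2; exact of_decide_eq_true (by simpa using this)
  have hcb : (xs.count b : Int) = m := by
    have := (List.mem_filter.mp hb).2; exact of_decide_eq_true (by simpa using this)
  have hax : a ∈ xs := List.count_pos_iff.mp (by omega)
  have hbx : b ∈ xs := List.count_pos_iff.mp (by omega)
  exact ⟨two_mem_length xs a b hab hax hbx, a, b, hab, hca, hcb⟩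

lemma count_eq_dropLast (xs : List String) (h : xs ≠ []) (l : String) :
    xs.count l = xs.dropLast.count l + (if xs.getLast h = l then 1 else 0) := by
  conv_lhs => rw [← List.dropLast_append_getLast h]
  rw [List.count_append]
  congr 1
  by_cases he : xs.getLast h = l
  · rw [if_pos he, he]
    simp
  · rw [if_neg he, List.count_eq_zero.mpr (by simp; exact fun e => he e.symm)]

lemma Mx_dropLast (xs : List String) (h : xs ≠ []) (h2 : 2 ≤ TiesN (PySem.List.dedup xs) xs (Mx xs)) :
    Mx xs.dropLast = Mx xs := by
  obtain ⟨-, l1, l2, hne, hc1, hc2⟩ :=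
    two_of_ties _ _ _ (Mx_pos xs h) (PySem.List.nodup_dedup xs) h2
  obtain ⟨l', hlz, hcl'⟩ : ∃ l', xs.getLast h ≠ l' ∧ (xs.count l' : Int) = Mx xs := by
    by_cases h1z : xs.getLast h = l1
    · exact ⟨l2, fun e => hne ((h1z.symm.trans e)), hc2⟩
    · exact ⟨l1, h1z, hc1⟩
  have hdl : (xs.dropLast.count l' : Int) = Mx xs := by
    have := count_eq_dropLast xs h l'
    rw [if_neg hlz] at this
    omega
  have hmem : l' ∈ xs.dropLast := by
    have h1 := Mx_pos xs h
    exact List.count_pos_iff.mp (by omega)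
  refine le_antisymm ?_ (hdl ▸ Mx_ge xs.dropLast l' hmem)
  obtain ⟨l, hl, hEq⟩ := Mx_attained xs.dropLast (List.ne_nil_of_mem hmem)
  have hlm : l ∈ xs.dropLast := (PySem.List.mem_dedup _ _).mp hl
  have hlx : l ∈ xs := by
    rw [← List.dropLast_append_getLast h]
    exact List.mem_append_left _ hlm
  have hle : xs.dropLast.count l ≤ xs.count l := by
    have := count_eq_dropLast xs h l
    omega
  have := Mx_ge xs l hlx
  omega

lemma unique_of_countP_one (ks : List String) (p : String → Bool) (hnd : ks.Nodup)
    (h1 : ks.countP p = 1) (a b : String) (ha : a ∈ ks) (hb : b ∈ ks)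
    (hpa : p a = true) (hpb : p b = true) : a = b := by
  rw [List.countP_eq_length_filter] at h1
  obtain ⟨u, hu⟩ := List.length_eq_one_iff.mp h1
  have ha' : a ∈ ks.filter p := List.mem_filter.mpr ⟨ha, hpa⟩
  have hb' : b ∈ ks.filter p := List.mem_filter.mpr ⟨hb, hpb⟩
  rw [hu] at ha' hb'
  simp at ha' hb'
  rw [ha', hb']

lemma find?_prefix (labels : List String) (k : Nat) (p : String → Bool)
    (h : ∀ l, p l = true → l ∈ labels.take k) :
    labels.find? p = (labels.take k).find? p := by
  conv_lhs => rw [← List.take_append_drop k labels]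
  rw [List.find?_append]
  cases hf : (labels.take k).find? p with
  | some w => simp
  | none =>
    cases hg : (labels.drop k).find? p with
    | none => simp
    | some w =>
      exfalso
      exact List.find?_eq_none.mp hf w (h w (List.find?_some hg)) (List.find?_some hg)

lemma counter_values (xs : List String) :
    (PySem.Dict.counter (κ := String) xs).values
      = (PySem.List.dedup xs).map (fun l => (xs.count l : Int)) := by
  have hv : (PySem.Dict.counter (κ := String) xs).values
      = ((PySem.Dict.counter (κ := String) xs).items).map Prod.snd := rfl
  rw [hv, PySem.Dict.items_counter, List.map_map]
  simp [PySem.List.dedup_eq_ofList, Function.comp]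

lemma countP_step (ks : List String) (hnd : ks.Nodup) (p q : String → Bool) (z : String)
    (hz : z ∈ ks) (hq : q z = false) (hagree : ∀ l, l ≠ z → p l = q l) :
    ks.countP p = ks.countP q + (if p z = true then 1 else 0) := by
  induction ks with
  | nil => cases hz
  | cons a t ih =>
    rw [List.countP_cons, List.countP_cons]
    by_cases haz : a = z
    · subst haz
      have hat : a ∉ t := (List.nodup_cons.mp hnd).1
      have ht : t.countP p = t.countP q :=
        List.countP_congr (fun l hl => by rw [hagree l (fun e => hat (e ▸ hl))])
      rw [ht, hq]
      simp
    · have hzt : z ∈ t := by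
        rcases List.mem_cons.mp hz with e | e
        · exact absurd e.symm haz
        · exact e
      rw [hagree a haz, ih (List.nodup_cons.mp hnd).2 hzt]
      omega

lemma TiesN_pos (labels xs : List String) (h : xs ≠ []) (hsub : ∀ l ∈ xs, l ∈ labels) :
    1 ≤ TiesN (PySem.List.dedup labels) xs (Mx xs) := by
  obtain ⟨l, hl, hEq⟩ := Mx_attained xs h
  have hld : l ∈ PySem.List.dedup labels := by
    have := hsub l ((PySem.List.mem_dedup xs l).mp hl)
    simp [this]
  have : 0 < (PySem.List.dedup labels).countP (fun l => ((xs.count l : Int) == Mx xs)) :=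
    List.countP_pos_iff.mpr ⟨l, hld, by simp [hEq]⟩
  unfold TiesN
  omega

lemma A_eq_ref_aux : ∀ (n : Nat) (xs : List String), xs.length ≤ n → xs ≠ [] →
    mvGo n xs = refFn xs := by
  intro n
  induction n with
  | zero =>
    intro xs hlen hne
    cases xs with
    | nil => exact absurd rfl hne
    | cons a t => simp at hlen
  | succ n ih =>
    intro xs hlen hne
    have hItems : (PySem.Dict.counter (κ := String) xs).items
        = (PySem.List.dedup xs).map (fun k => (k, (xs.count k : Int))) := by
      rw [PySem.Dict.items_counter]
      simp [PySem.List.dedup_eq_ofList]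
    have hdne : PySem.List.dedup xs ≠ [] := by
      obtain ⟨a, ha⟩ := List.exists_mem_of_ne_nil xs hne
      exact List.ne_nil_of_mem ((PySem.List.mem_dedup xs a).mpr ha)
    have hine : (PySem.Dict.counter (κ := String) xs).items ≠ [] := by
      rw [hItems]; simpa using hdne
    obtain ⟨wc, hwc⟩ : ∃ wc, PySem.List.max? (PySem.Dict.counter (κ := String) xs).items
        (fun p => p.2) = some wc := by
      cases hmm : PySem.List.max? (PySem.Dict.counter (κ := String) xs).items (fun p => p.2) with
      | none => exact absurd ((PySem.List.max?_eq_none_iff _ _).mp hmm) hine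
      | some w => exact ⟨w, rfl⟩
    have hmem := PySem.List.max?_mem hwc
    have hmax := PySem.List.max?_isMax hwc
    rw [hItems] at hmem
    obtain ⟨l0, hl0, hwcEq⟩ := List.mem_map.mp hmem
    have hw1 : wc.1 = l0 := by rw [← hwcEq]
    have hw2 : wc.2 = (xs.count l0 : Int) := by rw [← hwcEq]
    have hMx : wc.2 = Mx xs := by
      refine le_antisymm ?_ ?_
      · rw [hw2]
        exact Mx_ge xs l0 ((PySem.List.mem_dedup xs l0).mp hl0)
      · obtain ⟨l, hl, hEq⟩ := Mx_attained xs hne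
        have hmem2 : (l, (xs.count l : Int)) ∈ (PySem.Dict.counter (κ := String) xs).items := by
          rw [hItems]; exact List.mem_map_of_mem hl
        have := hmax _ hmem2
        simpa [hEq] using this
    have hnw : ((PySem.Dict.counter (κ := String) xs).values.filter
          (fun count => count == wc.2)).length
        = TiesN (PySem.List.dedup xs) xs (Mx xs) := by
      rw [counter_values, ← List.countP_eq_length_filter, List.countP_map, hMx]
      rfl
    rw [mvGo]
    simp only [hwc]
    rw [hnw]
    rw [refFn, dif_neg hne]
    by_cases hties : TiesN (PySem.List.dedup xs) xs (Mx xs) = 1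
    · rw [if_pos (show (TiesN (PySem.List.dedup xs) xs (Mx xs) == 1) = true by rw [beq_iff_eq]; exact hties)]
      rw [if_pos hties]
      have hpl0 : ((xs.count l0 : Int) == Mx xs) = true := by simp [← hw2, hMx]
      have hl0x : l0 ∈ xs := (PySem.List.mem_dedup xs l0).mp hl0
      obtain ⟨w, hw⟩ : ∃ w, xs.find? (fun l => ((xs.count l : Int) == Mx xs)) = some w := by
        have : (xs.find? (fun l => ((xs.count l : Int) == Mx xs))).isSome =  true :=
          List.find?_isSome.mpr ⟨l0, hl0x, hpl0⟩
        exact Option.isSome_iff_exists.mp this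
      have hpw := List.find?_some hw
      have hwx := List.mem_of_find?_eq_some hw
      unfold TiesN at hties
      have hl0w : l0 = w :=
        unique_of_countP_one (PySem.List.dedup xs) _ (PySem.List.nodup_dedup xs) hties
          l0 w hl0 ((PySem.List.mem_dedup xs w).mpr hwx) hpl0 hpw
      rw [hw, hw1, hl0w]
      rfl
    · rw [if_neg (show ¬((TiesN (PySem.List.dedup xs) xs (Mx xs) == 1) = true) by rw [beq_iff_eq]; exact hties)]
      rw [if_neg hties]
      rw [PySem.List.slice_to_neg_one]
      have h1 := TiesN_pos xs xs hne (fun l hl => hl)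
      have h2 : 2 ≤ TiesN (PySem.List.dedup xs) xs (Mx xs) := by omega
      obtain ⟨hlen2, -⟩ := two_of_ties _ _ _ (Mx_pos xs hne) (PySem.List.nodup_dedup xs) h2
      apply ih
      · rw [List.length_dropLast]; omega
      · intro e
        have he : xs.dropLast.length = 0 := by rw [e]; rfl
        rw [List.length_dropLast] at he
        omega

lemma A_eq_ref (xs : List String) (h : xs ≠ []) : majority_vote xs = refFn xs :=
  A_eq_ref_aux xs.length xs le_rfl h

lemma loop_lemma (labels : List String) (mx : Int) (hmx1 : 1 ≤ mx) :
    ∀ (k : Nat) (counts : PySem.Dict String Int) (ties : Int),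
    k ≤ labels.length →
    (∀ l, counts.getD l 0 = ((labels.take k).count l : Int)) →
    ties = (TiesN (PySem.List.dedup labels) (labels.take k) mx : Int) →
    Mx (labels.take k) = mx →
    labels.take k ≠ [] →
    ((labels.find? (fun l => (mvLoop labels mx k counts ties).getD l 0 == mx)).getD "")
      = refFn (labels.take k) := by
  intro k
  induction k with
  | zero =>
    intro counts ties hk hcounts hties hMx hne
    simp at hne
  | succ k' ih =>
    intro counts ties hk hcounts hties hMx hne
    have hsub : ∀ l ∈ labels.take (k' + 1), l ∈ labels := fun l hl => List.mem_of_mem_take hl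
    have hbr := TiesN_bridge labels (labels.take (k' + 1)) mx hmx1 hsub
    by_cases hcond : ties > 1
    · -- one more loop iteration
      rw [mvLoop, if_pos hcond]
      have hk' : k' < labels.length := hk
      have hz : PySem.List.pyGetD labels ((k' : Nat) : Int) "" = labels[k'] := by
        rw [PySem.List.pyGetD_natCast]
        exact List.getD_eq_getElem labels "" hk'
      rw [hz]
      have htake : labels.take (k' + 1) = labels.take k' ++ [labels[k']] := by
        rw [List.take_succ, List.getElem?_eq_getElem hk']
        rfl
      have hzmem : labels[k'] ∈ labels.take (k' + 1) := by
        rw [htake]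
        exact List.mem_append_right _ (List.mem_singleton_self _)
      have hzlab : labels[k'] ∈ labels := List.getElem_mem hk'
      have hzded : labels[k'] ∈ PySem.List.dedup labels :=
        (PySem.List.mem_dedup labels _).mpr hzlab
      have hc := hcounts labels[k']
      have hczz : (labels.take (k' + 1)).count labels[k']
          = (labels.take k').count labels[k'] + 1 := by
        rw [htake, List.count_append]
        simp
      have hcneq : ∀ l, l ≠ labels[k'] →
          (labels.take (k' + 1)).count l = (labels.take k').count l := by
        intro l hlz
        have hz0 : List.count l [labels[k']] = 0 :=
          List.count_eq_zero.mpr (by simp only [List.mem_singleton]; exact hlz)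
        rw [htake, List.count_append, hz0]
        omega
      have hcle : ((labels.take (k' + 1)).count labels[k'] : Int) ≤ mx := by
        rw [← hMx]
        exact Mx_ge _ _ hzmem
      have hcounts' : ∀ l, (counts.insert labels[k'] (counts.getD labels[k'] 0 - 1)).getD l 0
          = ((labels.take k').count l : Int) := by
        intro l
        rw [PySem.Dict.getD_insert]
        by_cases hlz : l = labels[k']
        · rw [if_pos hlz, hlz, hc]
          rw [hczz]
          push_cast
          ring
        · rw [if_neg hlz, hcounts l, hcneq l hlz]
      have hqz : (fun l => (((labels.take k').count l : Int) == mx)) labels[k'] = false := by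
        have hne2 : ((labels.take k').count labels[k'] : Int) ≠ mx := by
          have := hczz
          omega
        simpa using hne2
      have hagree : ∀ l, l ≠ labels[k'] →
          (fun l => (((labels.take (k' + 1)).count l : Int) == mx)) l
            = (fun l => (((labels.take k').count l : Int) == mx)) l := by
        intro l hlz
        simp only [hcneq l hlz]
      have hstep := countP_step (PySem.List.dedup labels) (PySem.List.nodup_dedup labels)
        _ _ labels[k'] hzded hqz hagree
      have hpz : ((((labels.take (k' + 1)).count labels[k'] : Int)) == mx)
          = (counts.getD labels[k'] 0 == mx) := by
        rw [hc]
      have hties' : (if counts.getD labels[k'] 0 == mx then ties - 1 else ties)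
          = ((TiesN (PySem.List.dedup labels) (labels.take k') mx : Nat) : Int) := by
        unfold TiesN at hties ⊢
        by_cases hcm : (counts.getD labels[k'] 0 == mx) = true
        · rw [if_pos hcm, hties]
          rw [hpz, hcm, if_pos rfl] at hstep
          push_cast
          omega
        · rw [if_neg hcm, hties]
          rw [hpz, Bool.eq_false_iff.mpr hcm, if_neg Bool.false_ne_true] at hstep
          push_cast
          omega
      have hties2 : 2 ≤ TiesN (PySem.List.dedup labels) (labels.take (k' + 1)) mx := by
        omega
      have hdrop : (labels.take (k' + 1)).dropLast = labels.take k' := by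
        rw [htake]
        exact List.dropLast_concat
      have hMx' : Mx (labels.take k') = mx := by
        rw [← hdrop, Mx_dropLast (labels.take (k' + 1)) hne (by rw [hMx, ← hbr]; exact hties2), hMx]
      obtain ⟨hlen2, -⟩ := two_of_ties _ _ _ hmx1 (PySem.List.nodup_dedup labels) hties2
      have hk1 : 1 ≤ k' := by
        rw [List.length_take] at hlen2
        omega
      have hne' : labels.take k' ≠ [] := by
        have : 0 < (labels.take k').length := by
          rw [List.length_take]
          omega
        exact List.ne_nil_of_length_pos this
      have href : refFn (labels.take (k' + 1)) = refFn (labels.take k') := by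
        rw [refFn, dif_neg hne, hMx, if_neg (by rw [← hbr]; omega), hdrop]
      rw [href]
      exact ih _ _ (le_of_lt hk') hcounts' hties' hMx' hne'
    · -- loop exit
      rw [mvLoop, if_neg hcond]
      have hpos := TiesN_pos labels (labels.take (k' + 1)) hne hsub
      rw [hMx] at hpos
      have hties1 : TiesN (PySem.List.dedup labels) (labels.take (k' + 1)) mx = 1 := by
        omega
      have hfuneq : (fun l => counts.getD l 0 == mx)
          = (fun l => (((labels.take (k' + 1)).count l : Int) == mx)) := by
        funext l
        rw [hcounts l]
      rw [hfuneq, find?_prefix labels (k' + 1) _ ?_]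
      · rw [refFn, dif_neg hne, hMx, if_pos (by rw [← hbr]; exact hties1)]
      · intro l hpl
        have hcm : ((labels.take (k' + 1)).count l : Int) = mx := of_decide_eq_true (by simpa using hpl)
        exact List.count_pos_iff.mp (by omega)

lemma B_eq_ref (xs : List String) (h : xs ≠ []) : majority_vote_alt xs = refFn xs := by
  have hfold : xs.foldl (fun d l => d.insert l (d.getD l 0 + 1)) PySem.Dict.empty
      = PySem.Dict.counter xs := PySem.Dict.foldl_insert_getD_add_one_eq_counter xs
  have hdne : PySem.List.dedup xs ≠ [] := by
    obtain ⟨a, ha⟩ := List.exists_mem_of_ne_nil xs h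
    exact List.ne_nil_of_mem ((PySem.List.mem_dedup xs a).mpr ha)
  have hvne : (PySem.Dict.counter (κ := String) xs).values ≠ [] := by
    rw [counter_values]
    simpa using hdne
  obtain ⟨mx, hmx⟩ : ∃ m, PySem.List.max? (PySem.Dict.counter (κ := String) xs).values
      (fun c => c) = some m := by
    cases hmm : PySem.List.max? (PySem.Dict.counter (κ := String) xs).values (fun c => c) with
    | none => exact absurd ((PySem.List.max?_eq_none_iff _ _).mp hmm) hvne
    | some w => exact ⟨w, rfl⟩
  have hmem := PySem.List.max?_mem hmx
  have hmax := PySem.List.max?_isMax hmx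
  have hMx : mx = Mx xs := by
    refine le_antisymm ?_ ?_
    · rw [counter_values] at hmem
      obtain ⟨l, hl, hEq⟩ := List.mem_map.mp hmem
      rw [← hEq]
      exact Mx_ge xs l ((PySem.List.mem_dedup xs l).mp hl)
    · obtain ⟨l, hl, hEq⟩ := Mx_attained xs h
      have hmm : (xs.count l : Int) ∈ (PySem.Dict.counter (κ := String) xs).values := by
        rw [counter_values]
        exact List.mem_map_of_mem hl
      have := hmax _ hmm
      simp only at this
      omega
  have hties : ((((PySem.Dict.counter (κ := String) xs).values.filter
        (fun c => c == mx)).length : Nat) : Int)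
      = ((TiesN (PySem.List.dedup xs) (xs.take xs.length) mx : Nat) : Int) := by
    rw [counter_values, ← List.countP_eq_length_filter, List.countP_map, List.take_length]
    rfl
  simp only [majority_vote_alt]
  rw [hfold]
  simp only [hmx]
  have hres := loop_lemma xs mx (by rw [hMx]; exact Mx_pos xs h) xs.length
    (PySem.Dict.counter xs)
    (((PySem.Dict.counter (κ := String) xs).values.filter (fun c => c == mx)).length : Int)
    (le_refl _)
    (fun l => by rw [List.take_length]; exact PySem.Dict.getD_counter xs l)
    hties
    (by rw [List.take_length, ← hMx])
    (by rw [List.take_length]; exact h)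
  rw [List.take_length] at hres
  exact hres

-- ===== VERDICT (by name: the statement is the Claim_ definition above) =====
theorem majority_vote_spec : Claim_equal_majority_vote := by
  intro labels _ hpre
  unfold Spec_majority_vote
  rw [A_eq_ref labels hpre, B_eq_ref labels hpre]
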